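-- pv_equiv track=rewrite | github.com/PWinwon/TIL | programmers/level2/짝지어제거하기.py | solution
-- ===== SOURCE A (Python) =====
-- def solution(s):
--     answer = 0
--     stack = []
--     idx = 0
--     sl = len(s)
--     while idx < sl:
--         if stack:
--             if stack[-1] == s[idx]:
--                 stack.pop()
--             else:
--                 stack.append(s[idx])
--         else:
--             stack.append(s[idx])
--         idx += 1
--
--     if stack:
--         return answer
--     else:
--         return 1
-- ===== SOURCE B (Python) =====
-- def solution(s):
--     t = s
--     while True:
--         out = []
--         i = 0
--         n = len(t)
--         while i < n:
--             if i + 1 < n and t[i] == t[i + 1]: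
--                 i += 2
--             else:
--                 out.append(t[i])
--                 i += 1
--         out = ''.join(out)
--         if out == t:
--             return 1 if t == '' else 0
--         t = out
-- ===== Notes on version B (the rewrite author's own statement) =====
-- stated objective: alternative
-- what changed: Replaces the single-pass stack with repeated left-to-right scans that delete adjacent equal pairs until a fixpoint, then tests emptiness.
import Mathlib
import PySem

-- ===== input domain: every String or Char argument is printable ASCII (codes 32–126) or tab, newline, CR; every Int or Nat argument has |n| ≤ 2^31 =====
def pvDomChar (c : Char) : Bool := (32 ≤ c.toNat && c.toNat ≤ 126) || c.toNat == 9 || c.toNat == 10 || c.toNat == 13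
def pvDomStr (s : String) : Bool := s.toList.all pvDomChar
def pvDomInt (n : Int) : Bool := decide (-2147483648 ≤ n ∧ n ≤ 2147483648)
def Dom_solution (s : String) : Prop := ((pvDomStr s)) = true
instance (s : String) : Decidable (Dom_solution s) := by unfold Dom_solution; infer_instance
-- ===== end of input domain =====

-- B replaces A's single-pass stack by repeated pair-removal scans to a fixpoint (alternative decomposition, same results).


-- ===== PORT A =====
-- one iteration of A's while loop: inspect stack top (stack[-1] = last), pop or append
def solStep (stack : List Char) (c : Char) : List Char :=
  if stack ≠ [] then
    if stack.getLast? = some c then stack.dropLast else stack ++ [c]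
  else stack ++ [c]

def solution (s : String) : Int :=
  let stack := s.toList.foldl solStep []
  if stack ≠ [] then 0 else 1

-- ===== PORT B =====
-- one left-to-right scan of Source B's inner while loop: skip both chars of an adjacent equal pair
def onePass : List Char → List Char
  | [] => []
  | [c] => [c]
  | a :: b :: t => if a = b then onePass t else a :: onePass (b :: t)

theorem onePass_length_le : ∀ l : List Char, (onePass l).length ≤ l.length
  | [] => le_refl _
  | [_] => le_refl _
  | a :: b :: t => by
      simp only [onePass]
      split
      · exact (onePass_length_le t).trans (by simp; omega)
      · simpa using onePass_length_le (b :: t)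

theorem onePass_lt_of_ne : ∀ l : List Char, onePass l ≠ l → (onePass l).length < l.length
  | [] => fun h => absurd rfl h
  | [_] => fun h => absurd rfl h
  | a :: b :: t => by
      intro h
      simp only [onePass] at h ⊢
      by_cases hab : a = b
      · simp only [if_pos hab]
        have := onePass_length_le t
        simp; omega
      · simp only [if_neg hab] at h ⊢
        have hne : onePass (b :: t) ≠ b :: t := fun e => h (by rw [e])
        have := onePass_lt_of_ne (b :: t) hne
        simpa using this

-- Source B's outer while loop: repeat onePass until the string is unchanged
def fixpass (l : List Char) : List Char :=
  let t := onePass l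
  if h : t = l then l else fixpass t
termination_by l.length
decreasing_by exact onePass_lt_of_ne l h

def solution_alt (s : String) : Int :=
  let r := fixpass s.toList
  if r = [] then 1 else 0

-- ===== PRECONDITION & SPEC =====
def Spec_solution (s : String) (out : Int) : Prop := out = solution_alt s
instance (s : String) (out : Int) : Decidable (Spec_solution s out) := by unfold Spec_solution; infer_instance

-- ===== CLAIM (what is proved, stated in full; the proofs are below) =====
def Claim_equal_solution : Prop := ∀ (s : String), Dom_solution s → Spec_solution s (solution s)

-- ===== LEMMAS AND PROOFS =====

-- reference reduction: A's stack with the top at the HEAD (reverse of A's stack)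
def redAux (st : List Char) : List Char → List Char
  | [] => st
  | c :: cs => if st.head? = some c then redAux st.tail cs else redAux (c :: st) cs

theorem redAux_cons (st : List Char) (c : Char) (cs : List Char) :
    redAux st (c :: cs) =
      if st.head? = some c then redAux st.tail cs else redAux (c :: st) cs := rfl

-- A's foldl over solStep is redAux on the reversed stack
theorem foldl_solStep_eq (l : List Char) : ∀ st : List Char,
    l.foldl solStep st = (redAux st.reverse l).reverse := by
  induction l with
  | nil => intro st; simp [redAux]
  | cons c cs ih =>
    intro st
    rw [List.foldl_cons, redAux_cons]
    by_cases hne : st = []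
    · subst hne
      simp [solStep, ih]
    · simp only [solStep, if_pos hne]
      by_cases hl : st.getLast? = some c
      · have hh : st.reverse.head? = some c := by rwa [List.head?_reverse]
        rw [if_pos hl, if_pos hh, ih, List.tail_reverse]
      · have hh : ¬ st.reverse.head? = some c := by rwa [List.head?_reverse]
        rw [if_neg hl, if_neg hh, ih]
        congr 1
        simp

-- removing one adjacent equal pair does not change the reduction
theorem redAux_del_pair (u : List Char) : ∀ (st v : List Char) (a : Char),
    List.IsChain (· ≠ ·) st → redAux st (u ++ a :: a :: v) = redAux st (u ++ v) := by
  induction u with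
  | nil =>
    intro st v a hst
    rw [List.nil_append, List.nil_append, redAux_cons]
    by_cases hh : st.head? = some a
    · rw [if_pos hh]
      match st, hh, hst with
      | c0 :: t, hh, hst =>
        have hc0 : c0 = a := by simpa using hh
        subst hc0
        simp only [List.tail_cons]
        match t, hst with
        | [], _ => simp [redAux]
        | b :: t', hst =>
          have hba : c0 ≠ b := (List.isChain_cons_cons.mp hst).1
          rw [redAux_cons, List.head?_cons,
            if_neg (by simpa using fun e => hba e.symm)]
    · rw [if_neg hh, redAux_cons, List.head?_cons, if_pos rfl, List.tail_cons]
  | cons c u' ih =>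
    intro st v a hst
    rw [List.cons_append, List.cons_append, redAux_cons, redAux_cons]
    by_cases hh : st.head? = some c
    · rw [if_pos hh, if_pos hh]
      exact ih _ _ _ hst.tail
    · rw [if_neg hh, if_neg hh]
      refine ih _ _ _ (List.isChain_cons.mpr ⟨?_, hst⟩)
      intro y hy hcy
      exact hh (by rw [hy, hcy])

-- one pass of B does not change the reduction
theorem redAux_onePass : ∀ (l st : List Char), List.IsChain (· ≠ ·) st →
    redAux st (onePass l) = redAux st l
  | [], _, _ => rfl
  | [_], _, _ => rfl
  | a :: b :: t, st, hst => by
    simp only [onePass]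
    by_cases hab : a = b
    · subst hab
      rw [if_pos rfl, redAux_onePass t st hst]
      exact (redAux_del_pair [] st t a hst).symm
    · rw [if_neg hab, redAux_cons, redAux_cons]
      by_cases hh : st.head? = some a
      · rw [if_pos hh, if_pos hh, redAux_onePass (b :: t) _ hst.tail]
      · rw [if_neg hh, if_neg hh]
        refine redAux_onePass (b :: t) _ (List.isChain_cons.mpr ⟨?_, hst⟩)
        intro y hy hay
        exact hh (by rw [hy, hay])
  termination_by l _ _ => l.length
  decreasing_by all_goals simp

-- the fixpoint reached by B has the same reduction as the input
theorem redAux_fixpass (l : List Char) : redAux [] (fixpass l) = redAux [] l := by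
  rw [fixpass]
  split
  · rfl
  · rw [redAux_fixpass (onePass l), redAux_onePass l [] List.isChain_nil]
termination_by l.length
decreasing_by exact onePass_lt_of_ne l (by assumption)

-- B's result is a fixed point of onePass
theorem onePass_fixpass (l : List Char) : onePass (fixpass l) = fixpass l := by
  rw [fixpass]
  split
  · assumption
  · exact onePass_fixpass (onePass l)
termination_by l.length
decreasing_by exact onePass_lt_of_ne l (by assumption)

-- a fixed point of onePass has no adjacent equal pair
theorem isChain_of_onePass_fix : ∀ l : List Char, onePass l = l → List.IsChain (· ≠ ·) l
  | [] => fun _ => List.isChain_nil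
  | [a] => fun _ => List.isChain_singleton a
  | a :: b :: t => by
    intro h
    simp only [onePass] at h
    by_cases hab : a = b
    · rw [if_pos hab] at h
      have hlen := onePass_length_le t
      rw [h] at hlen
      simp only [List.length_cons] at hlen
      omega
    · rw [if_neg hab] at h
      have h2 : onePass (b :: t) = b :: t := by injection h
      exact List.isChain_cons_cons.mpr ⟨hab, isChain_of_onePass_fix (b :: t) h2⟩

-- on a pair-free word the reduction is the identity (reversed onto the stack)
theorem redAux_of_isChain : ∀ (l : List Char) (c : Char) (st : List Char),
    List.IsChain (· ≠ ·) (c :: l) → redAux (c :: st) l = l.reverse ++ c :: st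
  | [], _, _, _ => by simp [redAux]
  | b :: t, c, st, h => by
    have hcb : c ≠ b := (List.isChain_cons_cons.mp h).1
    rw [redAux_cons, List.head?_cons, if_neg (by simpa using hcb)]
    rw [redAux_of_isChain t b (c :: st) (List.isChain_cons_cons.mp h).2]
    simp

theorem red_isChain_eq_reverse (l : List Char) (h : List.IsChain (· ≠ ·) l) :
    redAux [] l = l.reverse := by
  match l with
  | [] => rfl
  | c :: t =>
    rw [redAux_cons, if_neg (by simp), redAux_of_isChain t c [] h]
    simp

-- ===== VERDICT (by name: the statement is the Claim_ definition above) =====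
theorem solution_spec : Claim_equal_solution := by
  intro s _
  unfold Spec_solution solution solution_alt
  have hred : redAux [] s.toList = (fixpass s.toList).reverse := by
    rw [← redAux_fixpass s.toList,
      red_isChain_eq_reverse _ (isChain_of_onePass_fix _ (onePass_fixpass s.toList))]
  have hall : s.toList.foldl solStep [] = fixpass s.toList := by
    have := foldl_solStep_eq s.toList []
    simp only [List.reverse_nil] at this
    rw [this, hred, List.reverse_reverse]
  rw [hall]
  by_cases he : fixpass s.toList = [] <;> simp [he]
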